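-- pv_equiv track=rewrite | github.com/Algorithms-Design-and-Analysis/Proyecto-1 | src/otra_manera.py | extraer_respuesta
-- ===== SOURCE A (Python) =====
-- def extraer_respuesta(matriz):
--
--     configuraciones_unicas = [[]]
--
--     for forma in matriz:
--         movimiento_final = forma[-1]
--         for configuracion in movimiento_final:
--             if configuracion not in configuraciones_unicas:
--                 configuraciones_unicas.append(configuracion)
--
--     return (len(configuraciones_unicas)-1) % 998244353
-- ===== SOURCE B (Python) =====
-- def extraer_respuesta(matriz):
--     # sort-then-scan: flatten every final move, sort, count group boundaries (skip [])
--     plano = []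
--     for forma in matriz:
--         plano.extend(forma[-1])
--     plano.sort()
--     cuenta = 0
--     previa = None
--     for c in plano:
--         if c != [] and c != previa:
--             cuenta += 1
--         previa = c
--     return cuenta % 998244353
-- ===== Notes on version B (the rewrite author's own statement) =====
-- stated objective: faster
-- what changed: B flattens all final moves into one list, sorts it, and counts group boundaries (skipping the empty configuration) in a single linear scan, instead of A's growing unique-list with a linear membership test per configuration
import Mathlib
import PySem

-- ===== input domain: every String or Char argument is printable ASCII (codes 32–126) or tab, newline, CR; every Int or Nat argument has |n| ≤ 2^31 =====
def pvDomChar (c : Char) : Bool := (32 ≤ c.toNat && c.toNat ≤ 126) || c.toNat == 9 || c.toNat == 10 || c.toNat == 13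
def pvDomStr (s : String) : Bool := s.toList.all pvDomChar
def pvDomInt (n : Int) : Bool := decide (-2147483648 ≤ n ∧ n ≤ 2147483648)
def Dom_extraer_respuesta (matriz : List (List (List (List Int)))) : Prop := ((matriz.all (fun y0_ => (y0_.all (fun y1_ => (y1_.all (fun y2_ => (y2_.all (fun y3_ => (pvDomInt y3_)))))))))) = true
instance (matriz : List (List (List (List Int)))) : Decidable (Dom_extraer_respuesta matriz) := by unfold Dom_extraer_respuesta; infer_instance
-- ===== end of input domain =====

-- B replaces A's growing-list membership scan by sort-then-scan: flatten, sort, count group boundaries (skipping []); objective: faster.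

-- ===== PORT A =====
-- forma[-1] raises IndexError on an empty row; Pre_ excludes that, so the getD default is never reached inside Pre_.
def extraer_respuesta (matriz : List (List (List (List Int)))) : Int :=
  let u := matriz.foldl (fun acc forma =>
      let movimiento_final := (PySem.List.pyGet? forma (-1)).getD []
      movimiento_final.foldl (fun acc c => if c ∈ acc then acc else acc ++ [c]) acc)
    [([] : List Int)]
  PySem.Int.mod ((u.length : Int) - 1) 998244353

-- ===== PORT B =====
def extraer_respuesta_alt (matriz : List (List (List (List Int)))) : Int :=
  let plano := matriz.foldl (fun acc forma => acc ++ (PySem.List.pyGet? forma (-1)).getD []) []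
  let ordenado := PySem.List.sorted plano (fun x => x) false
  let st := ordenado.foldl (fun (st : Int × Option (List Int)) c =>
      (if c ≠ [] ∧ some c ≠ st.2 then st.1 + 1 else st.1, some c)) ((0 : Int), (none : Option (List Int)))
  PySem.Int.mod st.1 998244353

-- ===== PRECONDITION & SPEC =====
-- Pre_: every row is nonempty (forma[-1] raises IndexError on an empty row, in A and in B alike).
def Pre_extraer_respuesta (matriz : List (List (List (List Int)))) : Prop :=
  ∀ forma ∈ matriz, forma ≠ []
instance (matriz : List (List (List (List Int)))) : Decidable (Pre_extraer_respuesta matriz) := by unfold Pre_extraer_respuesta; infer_instance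
def pvWitness_extraer_respuesta : List (List (List (List Int))) := [[[[1, 2], []]], [[[1, 2], [3]]]]
def Spec_extraer_respuesta (matriz : List (List (List (List Int)))) (out : Int) : Prop := out = extraer_respuesta_alt matriz
instance (matriz : List (List (List (List Int)))) (out : Int) : Decidable (Spec_extraer_respuesta matriz out) := by unfold Spec_extraer_respuesta; infer_instance

-- ===== CLAIM (what is proved, stated in full; the proofs are below) =====
def Claim_equal_extraer_respuesta : Prop := ∀ (matriz : List (List (List (List Int)))), Dom_extraer_respuesta matriz → Pre_extraer_respuesta matriz → Spec_extraer_respuesta matriz (extraer_respuesta matriz)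

-- ===== LEMMAS AND PROOFS =====

-- A-side invariant: A's accumulator is [] :: (the set of distinct non-empty configurations seen)
theorem pv_inner (mf : List (List Int)) (s : List (List Int)) :
    mf.foldl (fun acc c => if c ∈ acc then acc else acc ++ [c]) ([] :: s)
      = [] :: mf.foldl (fun s c => if c = [] then s else PySem.Set.add s c) s := by
  induction mf generalizing s with
  | nil => rfl
  | cons c mf ih =>
    simp only [List.foldl_cons]
    by_cases hnil : c = []
    · subst hnil
      simp [PySem.Set.add, ih]
    · by_cases hmem : c ∈ s
      · have : c ∈ ([] :: s) := List.mem_cons_of_mem _ hmem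
        simp [this, hnil, hmem, PySem.Set.add, ih, PySem.Set.contains]
      · have : c ∉ ([] :: s) := by
          intro h; rcases List.mem_cons.mp h with h | h
          · exact hnil h
          · exact hmem h
        simp [this, hnil, hmem, PySem.Set.add, PySem.Set.contains, ih]

theorem pv_outer (matriz : List (List (List (List Int)))) (s : List (List Int)) :
    matriz.foldl (fun acc forma =>
        ((PySem.List.pyGet? forma (-1)).getD []).foldl
          (fun acc c => if c ∈ acc then acc else acc ++ [c]) acc) ([] :: s)
      = [] :: matriz.foldl (fun s forma =>
          ((PySem.List.pyGet? forma (-1)).getD []).foldl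
            (fun s c => if c = [] then s else PySem.Set.add s c) s) s := by
  induction matriz generalizing s with
  | nil => rfl
  | cons forma rest ih =>
    simp only [List.foldl_cons, pv_inner, ih]

-- the skip-[] set fold is Set.add over the filtered list
theorem pv_skipfold (l : List (List Int)) (s : PySem.Set (List Int)) :
    l.foldl (fun s c => if c = [] then s else PySem.Set.add s c) s
      = (l.filter (fun c => decide ¬(c = []))).foldl PySem.Set.add s := by
  induction l generalizing s with
  | nil => rfl
  | cons c t ih =>
    by_cases h : c = [] <;> simp [List.foldl_cons, h, ih]

-- |set(L)| = |toFinset L|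
theorem pv_ofList_card (L : List (List Int)) :
    (PySem.Set.ofList L : List (List Int)).length = L.toFinset.card := by
  have h2 : (PySem.Set.ofList L : List (List Int)).toFinset = L.toFinset := by
    apply Finset.ext; intro x
    simp [List.mem_toFinset, PySem.Set.mem_ofList]
  rw [← h2]
  exact (List.toFinset_card_of_nodup (PySem.Set.nodup_ofList L)).symm

-- the ambient order on List Int: a nonempty list is greater than []
theorem pv_nil_lt (a : Int) (l : List Int) : ([] : List Int) < a :: l := List.nil_lt_cons a l

theorem pv_le_nil {p : List Int} (h : p ≤ ([] : List Int)) : p = [] := by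
  cases p with
  | nil => rfl
  | cons a l => exact absurd h (not_le.mpr (pv_nil_lt a l))

-- bridge: PySem.List.sorted with the elaborated Decidable instance is sorted with the LinearOrder instance
theorem pv_sorted_pairwise (xs : List (List Int)) :
    (PySem.List.sorted xs (fun x => x) false).Pairwise (fun a b => a ≤ b) := by
  have hd : (fun (a b : List Int) => a.decidableLT b)
      = (@LinearOrder.toDecidableLT _ List.instLinearOrder) := by
    funext a b; exact Subsingleton.elim _ _
  have hrw : PySem.List.sorted xs (fun x => x) false
      = @PySem.List.sorted (List Int) (List Int) _ (@LinearOrder.toDecidableLT _ List.instLinearOrder) xs (fun x => x) false :=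
    congrArg (fun d => @PySem.List.sorted (List Int) (List Int) List.instLT d xs (fun x => x) false) hd
  rw [hrw]
  exact PySem.List.sorted_pairwise xs _

-- B-side main induction: the boundary-counting fold over a ≤-sorted list counts
-- the distinct elements that are neither [] nor the previous value
theorem pv_bmain (s : List (List Int)) : ∀ (prev : Option (List Int)) (k : Int),
    s.Pairwise (fun a b => a ≤ b) →
    (∀ x ∈ s, ∀ p, prev = some p → p ≤ x) →
    (s.foldl (fun (st : Int × Option (List Int)) c =>
        (if c ≠ [] ∧ some c ≠ st.2 then st.1 + 1 else st.1, some c)) (k, prev)).1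
      = k + ((s.toFinset.filter (fun x => x ≠ [] ∧ some x ≠ prev)).card : Int) := by
  induction s with
  | nil => intro prev k _ _; simp
  | cons c t ih =>
    intro prev k hpw hprev
    obtain ⟨hct, hpt⟩ := List.pairwise_cons.mp hpw
    have hnext : ∀ x ∈ t, ∀ p, (some c : Option (List Int)) = some p → p ≤ x := by
      intro x hx p hp
      injection hp with hp; subst hp; exact hct x hx
    simp only [List.foldl_cons]
    by_cases hcond : c ≠ [] ∧ some c ≠ prev
    · rw [if_pos hcond, ih (some c) (k + 1) hpt hnext]
      -- on t, "≠ prev" is automatic: any p with prev = some p has p < c ≤ x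
      have hA : t.toFinset.filter (fun x => x ≠ [] ∧ some x ≠ prev)
          = t.toFinset.filter (fun x => x ≠ []) := by
        apply Finset.filter_congr
        intro x hx
        rw [List.mem_toFinset] at hx
        constructor
        · exact fun h => h.1
        · intro h
          refine ⟨h, ?_⟩
          intro heq
          cases prev with
          | none => simp at heq
          | some p =>
            have hxp : x = p := by injection heq
            have hpc : p < c := lt_of_le_of_ne (hprev c (List.mem_cons_self) p rfl)
              (fun h' => hcond.2 (by rw [h']))
            have : p < x := lt_of_lt_of_le hpc (hct x hx)
            exact absurd hxp.symm (ne_of_lt this)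
      have hB : t.toFinset.filter (fun x => x ≠ [] ∧ some x ≠ some c)
          = (t.toFinset.filter (fun x => x ≠ [])).erase c := by
        rw [← Finset.filter_ne']
        rw [Finset.filter_filter]
        apply Finset.filter_congr
        intro x _
        constructor
        · intro h; exact ⟨h.1, fun h' => h.2 (by rw [h'])⟩
        · intro h; exact ⟨h.1, fun h' => h.2 (by injection h')⟩
      have hI : (c :: t).toFinset.filter (fun x => x ≠ [] ∧ some x ≠ prev)
          = insert c (t.toFinset.filter (fun x => x ≠ [])) := by
        rw [List.toFinset_cons, Finset.filter_insert, if_pos hcond, hA]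
      rw [hB, hI]
      have hcard : (insert c (t.toFinset.filter (fun x => x ≠ []))).card
          = ((t.toFinset.filter (fun x => x ≠ [])).erase c).card + 1 := by
        by_cases hm : c ∈ t.toFinset.filter (fun x => x ≠ [])
        · rw [Finset.insert_eq_self.mpr hm, Finset.card_erase_add_one hm]
        · rw [Finset.card_insert_of_notMem hm, Finset.erase_eq_of_notMem hm]
      rw [hcard]
      push_cast
      ring
    · rw [if_neg hcond, ih (some c) k hpt hnext]
      have hI : (c :: t).toFinset.filter (fun x => x ≠ [] ∧ some x ≠ prev)
          = t.toFinset.filter (fun x => x ≠ [] ∧ some x ≠ prev) := by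
        rw [List.toFinset_cons, Finset.filter_insert, if_neg hcond]
      rw [hI]
      rcases not_and_or.mp hcond with hc | hc
      · -- c = []; then prev is none or some [], and both predicates reduce to x ≠ []
        replace hc : c = [] := not_not.mp hc
        have hprev' : prev = none ∨ prev = some ([] : List Int) := by
          cases prev with
          | none => exact Or.inl rfl
          | some p =>
            right
            have : p ≤ c := hprev c (List.mem_cons_self) p rfl
            rw [hc] at this
            rw [pv_le_nil this]
        have hfe : ∀ (q : Option (List Int)), q = none ∨ q = some ([] : List Int) →
            t.toFinset.filter (fun x => x ≠ [] ∧ some x ≠ q)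
              = t.toFinset.filter (fun x => x ≠ []) := by
          intro q hq
          apply Finset.filter_congr
          intro x _
          constructor
          · exact fun h => h.1
          · intro h
            refine ⟨h, ?_⟩
            rcases hq with hq | hq <;> subst hq
            · intro h'; simp at h'
            · intro h'
              exact h (by injection h')
        rw [hfe prev hprev', hfe (some c) (Or.inr (by rw [hc]))]
      · -- some c = prev: the two predicates are literally the same
        replace hc : some c = prev := not_not.mp hc
        rw [hc]

-- top-level B count: boundaries of the sorted list = distinct non-[] elements of the list
theorem pv_bcount (xs : List (List Int)) :
    ((PySem.List.sorted xs (fun x => x) false).foldl (fun (st : Int × Option (List Int)) c =>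
        (if c ≠ [] ∧ some c ≠ st.2 then st.1 + 1 else st.1, some c)) ((0 : Int), none)).1
      = ((xs.toFinset.filter (fun x => x ≠ [])).card : Int) := by
  rw [pv_bmain _ none 0 (pv_sorted_pairwise xs) (by intro x _ p hp; simp at hp)]
  have h1 : (PySem.List.sorted xs (fun x => x) false).toFinset = xs.toFinset := by
    apply Finset.ext; intro x
    simp [List.mem_toFinset, PySem.List.mem_sorted]
  have h2 : xs.toFinset.filter (fun x => x ≠ [] ∧ some x ≠ (none : Option (List Int)))
      = xs.toFinset.filter (fun x => x ≠ []) := by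
    apply Finset.filter_congr
    intro x _
    exact ⟨fun h => h.1, fun h => ⟨h, fun h' => by simp at h'⟩⟩
  rw [h1, h2]
  ring

-- ===== VERDICT (by name: the statement is the Claim_ definition above) =====
theorem extraer_respuesta_spec : Claim_equal_extraer_respuesta := by
  intro matriz _ _
  unfold Spec_extraer_respuesta extraer_respuesta extraer_respuesta_alt
  rw [pv_outer matriz []]
  rw [PySem.List.foldl_append_eq_flatMap]
  simp only [List.nil_append]
  set g : List (List (List Int)) → List (List Int) :=
    fun forma => (PySem.List.pyGet? forma (-1)).getD [] with hg
  have hAfold : matriz.foldl (fun s forma =>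
        (g forma).foldl (fun s c => if c = [] then s else PySem.Set.add s c) s) []
      = (matriz.flatMap g).foldl (fun s c => if c = [] then s else PySem.Set.add s c) [] :=
    (List.foldl_flatMap).symm
  rw [hAfold, pv_skipfold, pv_bcount]
  have hset : ((matriz.flatMap g).filter (fun c => decide ¬(c = []))).foldl PySem.Set.add []
      = PySem.Set.ofList ((matriz.flatMap g).filter (fun c => decide ¬(c = []))) :=
    (PySem.Set.ofList_eq_foldl _).symm
  rw [hset]
  have hcard : (PySem.Set.ofList ((matriz.flatMap g).filter (fun c => decide ¬(c = []))) :
        List (List Int)).length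
      = ((matriz.flatMap g).toFinset.filter (fun x => x ≠ [])).card := by
    rw [pv_ofList_card, List.toFinset_filter]
    congr 1
    apply Finset.filter_congr
    intro x _
    simp
  simp only [List.length_cons, hcard]
  congr 1
  push_cast
  ring
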